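-- pv_equiv track=rewrite | github.com/MasterDongDongTheServantOfGod/sermon-extractor | app/services/transcript_extractor.py | _caption_language_priority
-- ===== SOURCE A (Python) =====
-- from typing import Callable, Optional, Tuple, Dict, List
--
-- ENGLISH_TRANSCRIPT_LANGS = ["en", "en-US", "en-GB", "a.en"]
--
-- def _caption_language_priority(caption_map: dict) -> List[str]:
--     languages = []
--     for language in ENGLISH_TRANSCRIPT_LANGS:
--         if language in caption_map:
--             languages.append(language)
--     for language in caption_map:
--         if language.startswith("en") and language not in languages:
--             languages.append(language)
--     for language in caption_map:
--         if language not in languages: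
--             languages.append(language)
--     return languages
-- ===== SOURCE B (Python) =====
-- ENGLISH_TRANSCRIPT_LANGS = ["en", "en-US", "en-GB", "a.en"]
--
-- def _caption_language_priority(caption_map: dict):
--     idx = {lang: i for i, lang in enumerate(ENGLISH_TRANSCRIPT_LANGS)}
--     def key(lang):
--         if lang in idx:
--             return (0, idx[lang])
--         return (1, 0) if lang.startswith("en") else (2, 0)
--     return sorted(caption_map, key=key)
-- ===== Notes on version B (the rewrite author's own statement) =====
-- stated objective: faster
-- what changed: A builds the result with three sequential filtering scans whose 'language not in languages' list-membership tests are linear (quadratic overall); B maps each ENGLISH_TRANSCRIPT_LANGS entry to its index once and returns a single stable sorted() of the dict's keys under a (group, priority-index) key, relying on sort stability for the tie order.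
import Mathlib
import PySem

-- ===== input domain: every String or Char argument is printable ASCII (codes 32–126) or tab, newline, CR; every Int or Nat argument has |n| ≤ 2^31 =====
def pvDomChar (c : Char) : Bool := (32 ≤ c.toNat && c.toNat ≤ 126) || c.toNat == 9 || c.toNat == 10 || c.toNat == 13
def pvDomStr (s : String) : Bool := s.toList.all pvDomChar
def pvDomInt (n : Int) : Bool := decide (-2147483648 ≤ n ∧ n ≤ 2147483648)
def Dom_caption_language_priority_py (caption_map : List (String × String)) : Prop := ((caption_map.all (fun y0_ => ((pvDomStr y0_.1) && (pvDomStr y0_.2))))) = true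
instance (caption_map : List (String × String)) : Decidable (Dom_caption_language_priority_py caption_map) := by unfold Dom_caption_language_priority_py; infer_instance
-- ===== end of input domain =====

-- B replaces A's three filtering scans (whose `not in languages` list tests make A quadratic) by one
-- stable sort of the dict's keys under an English-first (group, index) key; measured faster at scale.

-- ===== PORT A =====
-- ENGLISH_TRANSCRIPT_LANGS (module constant)
def pvEnglishLangs : List String := ["en", "en-US", "en-GB", "a.en"]

-- literal port of A: the dict's keys are the first components, first occurrence kept
def caption_language_priority_py (caption_map : List (String × String)) : List String :=
  let keys := PySem.List.dedup (caption_map.map Prod.fst)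
  -- for language in ENGLISH_TRANSCRIPT_LANGS: if language in caption_map: languages.append(language)
  let l1 := pvEnglishLangs.foldl (fun acc lang => if keys.contains lang then acc ++ [lang] else acc) []
  -- for language in caption_map: if language.startswith("en") and language not in languages: append
  let l2 := keys.foldl (fun acc lang => if PySem.Str.startswith lang "en" && !acc.contains lang then acc ++ [lang] else acc) l1
  -- for language in caption_map: if language not in languages: append
  keys.foldl (fun acc lang => if !acc.contains lang then acc ++ [lang] else acc) l2

-- ===== PORT B =====
-- idx = {lang: i for i, lang in enumerate(ENGLISH_TRANSCRIPT_LANGS)}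
def pvIdxDict : PySem.Dict String Int :=
  (PySem.List.enumerate pvEnglishLangs 0).foldl (fun d p => d.insert p.2 p.1) ⟨[]⟩

-- key(lang) = (0, idx[lang]) if lang in idx else (1, 0) if lang.startswith("en") else (2, 0)
def pvKey (lang : String) : Int × Int :=
  match pvIdxDict.get? lang with
  | some i => (0, i)
  | none => if PySem.Str.startswith lang "en" then (1, 0) else (2, 0)

-- return sorted(caption_map, key=key)   (iterates the dict's keys; tuple key → sorted2)
def caption_language_priority_py_alt (caption_map : List (String × String)) : List String :=
  PySem.List.sorted2 (PySem.List.dedup (caption_map.map Prod.fst))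
    (fun l => (pvKey l).1) (fun l => (pvKey l).2)

-- ===== PRECONDITION & SPEC =====
def Spec_caption_language_priority_py (caption_map : List (String × String)) (out : List String) : Prop := out = caption_language_priority_py_alt caption_map
instance (caption_map : List (String × String)) (out : List String) : Decidable (Spec_caption_language_priority_py caption_map out) := by unfold Spec_caption_language_priority_py; infer_instance

-- ===== CLAIM (what is proved, stated in full; the proofs are below) =====
def Claim_equal_caption_language_priority_py : Prop := ∀ (caption_map : List (String × String)), Dom_caption_language_priority_py caption_map → Spec_caption_language_priority_py caption_map (caption_language_priority_py caption_map)

-- ===== LEMMAS AND PROOFS =====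

-- the common target: English-list order first, then "en"-prefixed keys, then the rest
def pvG0 (p : List String) : List String := pvEnglishLangs.filter (fun l => p.contains l)
def pvG1 (p : List String) : List String :=
  p.filter (fun l => PySem.Str.startswith l "en" && !pvEnglishLangs.contains l)
def pvG2 (p : List String) : List String :=
  p.filter (fun l => !pvEnglishLangs.contains l && !PySem.Str.startswith l "en")
def pvG (p : List String) : List String := pvG0 p ++ pvG1 p ++ pvG2 p

-- the strict lexicographic "before" relation sorted2 uses with pvKey
def pvBf (a b : String) : Bool :=
  decide ((pvKey a).1 < (pvKey b).1) ||
    (!decide ((pvKey b).1 < (pvKey a).1) && decide ((pvKey a).2 < (pvKey b).2))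

lemma pvKey_eq (l : String) : pvKey l =
    if l = "en" then ((0 : Int), (0 : Int)) else if l = "en-US" then (0, 1)
    else if l = "en-GB" then (0, 2) else if l = "a.en" then (0, 3)
    else if PySem.Str.startswith l "en" then (1, 0) else (2, 0) := by
  have hd : pvIdxDict =
      (((((⟨[]⟩ : PySem.Dict String Int).insert "en" 0).insert "en-US" 1).insert "en-GB" 2).insert "a.en" 3) := rfl
  by_cases h1 : l = "en"; · subst h1; decide
  by_cases h2 : l = "en-US"; · subst h2; decide
  by_cases h3 : l = "en-GB"; · subst h3; decide
  by_cases h4 : l = "a.en"; · subst h4; decide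
  have hn : pvIdxDict.get? l = none := by
    rw [hd, PySem.Dict.get?_insert_of_ne _ _ h4, PySem.Dict.get?_insert_of_ne _ _ h3,
      PySem.Dict.get?_insert_of_ne _ _ h2, PySem.Dict.get?_insert_of_ne _ _ h1]
    rfl
  simp [pvKey, hn, h1, h2, h3, h4]

lemma pvBf_false {x y : String}
    (h : (pvKey y).1 < (pvKey x).1 ∨ ((pvKey y).1 = (pvKey x).1 ∧ (pvKey y).2 ≤ (pvKey x).2)) :
    pvBf x y = false := by
  simp only [pvBf, Bool.or_eq_false_iff, Bool.and_eq_false_iff, Bool.not_eq_false',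
    decide_eq_false_iff_not, decide_eq_true_eq]
  omega

lemma pvBf_true {x y : String}
    (h : (pvKey x).1 < (pvKey y).1 ∨ ((pvKey x).1 = (pvKey y).1 ∧ (pvKey x).2 < (pvKey y).2)) :
    pvBf x y = true := by
  simp only [pvBf, Bool.or_eq_true, Bool.and_eq_true, Bool.not_eq_true',
    decide_eq_false_iff_not, decide_eq_true_eq]
  omega

lemma pvKey_of_g1 {y : String} (hs : PySem.Str.startswith y "en" = true)
    (hne : pvEnglishLangs.contains y = false) : pvKey y = (1, 0) := by
  simp only [pvEnglishLangs, List.contains_eq_mem, decide_eq_false_iff_not,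
    List.mem_cons, List.not_mem_nil, or_false, not_or] at hne
  obtain ⟨h1, h2, h3, h4⟩ := hne
  have hs' : PySem.Chars.startswith y.toList ['e', 'n'] = true := by simpa using hs
  simp [pvKey_eq, h1, h2, h3, h4, hs']

lemma pvKey_of_g2 {y : String} (hs : PySem.Str.startswith y "en" = false)
    (hne : pvEnglishLangs.contains y = false) : pvKey y = (2, 0) := by
  simp only [pvEnglishLangs, List.contains_eq_mem, decide_eq_false_iff_not,
    List.mem_cons, List.not_mem_nil, or_false, not_or] at hne
  obtain ⟨h1, h2, h3, h4⟩ := hne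
  have hs' : PySem.Chars.startswith y.toList ['e', 'n'] = false := by simpa using hs
  simp [pvKey_eq, h1, h2, h3, h4, hs']

-- insertBy skips a prefix where `before` is false
lemma insertBy_skip (bf : String → String → Bool) (x : String) (l r : List String)
    (h : ∀ y ∈ l, bf x y = false) :
    PySem.List.insertBy bf x (l ++ r) = l ++ PySem.List.insertBy bf x r := by
  induction l with
  | nil => rfl
  | cons a t ih =>
    have ha : bf x a = false := h a (by simp)
    simp only [List.cons_append, PySem.List.insertBy, ha]
    simp only [Bool.false_eq_true, if_false]
    rw [ih (fun y hy => h y (by simp [hy]))]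

-- insertBy puts x in front when `before` holds of every element
lemma insertBy_front (bf : String → String → Bool) (x : String) (r : List String)
    (h : ∀ y ∈ r, bf x y = true) :
    PySem.List.insertBy bf x r = x :: r := by
  cases r with
  | nil => rfl
  | cons a t => simp [PySem.List.insertBy, h a (by simp)]

-- A-side loop shapes -----------------------------------------------------------

lemma foldl_dedup_filter (q : String → Bool) (ks : List String) :
    ∀ init : List String, ks.Nodup →
    ks.foldl (fun acc l => if q l && !acc.contains l then acc ++ [l] else acc) init
      = init ++ ks.filter (fun l => q l && !init.contains l) := by
  induction ks with
  | nil => intro init _; simp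
  | cons k t ih =>
    intro init hnd
    have hk : k ∉ t := (List.nodup_cons.mp hnd).1
    have hnd' : t.Nodup := (List.nodup_cons.mp hnd).2
    by_cases h : (q k && !init.contains k) = true
    · simp only [List.foldl_cons, if_true, List.filter_cons, h]
      rw [ih (init ++ [k]) hnd']
      have : t.filter (fun l => q l && !(init ++ [k]).contains l)
          = t.filter (fun l => q l && !init.contains l) := by
        apply List.filter_congr
        intro l hl
        have : l ≠ k := fun e => hk (e ▸ hl)
        simp [List.contains_eq_mem, this]
      rw [this]; simp
    · simp only [List.foldl_cons, List.filter_cons, h]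
      exact ih init hnd'

lemma foldl_dedup_all (ks : List String) :
    ∀ init : List String, ks.Nodup →
    ks.foldl (fun acc l => if !acc.contains l then acc ++ [l] else acc) init
      = init ++ ks.filter (fun l => !init.contains l) := by
  induction ks with
  | nil => intro init _; simp
  | cons k t ih =>
    intro init hnd
    have hk : k ∉ t := (List.nodup_cons.mp hnd).1
    have hnd' : t.Nodup := (List.nodup_cons.mp hnd).2
    by_cases h : (!init.contains k) = true
    · simp only [List.foldl_cons, if_true, List.filter_cons, h]
      rw [ih (init ++ [k]) hnd']
      have : t.filter (fun l => !(init ++ [k]).contains l)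
          = t.filter (fun l => !init.contains l) := by
        apply List.filter_congr
        intro l hl
        have : l ≠ k := fun e => hk (e ▸ hl)
        simp [List.contains_eq_mem, this]
      rw [this]; simp
    · simp only [List.foldl_cons, List.filter_cons, h]
      exact ih init hnd'

lemma portA_eq_pvG (ks : List String) (hnd : ks.Nodup) :
    (ks.foldl (fun acc lang => if !acc.contains lang then acc ++ [lang] else acc)
      (ks.foldl (fun acc lang => if PySem.Str.startswith lang "en" && !acc.contains lang then acc ++ [lang] else acc)
        (pvEnglishLangs.foldl (fun acc lang => if ks.contains lang then acc ++ [lang] else acc) [])))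
      = pvG ks := by
  have hl1 : pvEnglishLangs.foldl (fun acc lang => if ks.contains lang then acc ++ [lang] else acc) ([] : List String)
      = pvG0 ks := by
    simpa [pvG0] using
      PySem.List.foldl_append_if (fun lang => ks.contains lang) id pvEnglishLangs []
  rw [hl1, foldl_dedup_filter _ ks (pvG0 ks) hnd]
  have hF2 : ks.filter (fun l => PySem.Str.startswith l "en" && !(pvG0 ks).contains l) = pvG1 ks := by
    unfold pvG1
    apply List.filter_congr
    intro l hl
    have hc : (pvG0 ks).contains l = pvEnglishLangs.contains l := by
      simp [pvG0, List.contains_eq_mem, List.mem_filter, hl]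
    rw [hc]
  rw [hF2, foldl_dedup_all ks (pvG0 ks ++ pvG1 ks) hnd]
  have hF3 : ks.filter (fun l => !(pvG0 ks ++ pvG1 ks).contains l) = pvG2 ks := by
    unfold pvG2
    apply List.filter_congr
    intro l hl
    by_cases he : l ∈ pvEnglishLangs <;>
      by_cases hst : PySem.Chars.startswith l.toList ['e', 'n'] = true <;>
        simp [pvG0, pvG1, List.contains_eq_mem, List.mem_filter, hl, he, hst]
  rw [hF3]
  simp [pvG]

-- B-side: the stable insertion sort builds pvG ------------------------------------

lemma mem_pvG0 {y : String} {q : List String} (h : y ∈ pvG0 q) :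
    y ∈ pvEnglishLangs ∧ y ∈ q := by
  simpa [pvG0, List.mem_filter, List.contains_eq_mem] using h

lemma key_mem_pvG1 {y : String} {q : List String} (h : y ∈ pvG1 q) : pvKey y = (1, 0) := by
  unfold pvG1 at h
  rw [List.mem_filter] at h
  obtain ⟨-, hc⟩ := h
  rw [Bool.and_eq_true] at hc
  exact pvKey_of_g1 hc.1 (by simpa using hc.2)

lemma key_mem_pvG2 {y : String} {q : List String} (h : y ∈ pvG2 q) : pvKey y = (2, 0) := by
  unfold pvG2 at h
  rw [List.mem_filter] at h
  obtain ⟨-, hc⟩ := h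
  rw [Bool.and_eq_true] at hc
  exact pvKey_of_g2 (by simpa using hc.2) (by simpa using hc.1)

lemma keyE_fst {y : String} (h : y ∈ pvEnglishLangs) : (pvKey y).1 = 0 := by
  fin_cases h <;> decide

-- insert x between a skipped prefix and a fronted suffix
lemma insert_mid (x : String) (low high : List String)
    (hlow : ∀ y ∈ low, pvBf x y = false) (hhigh : ∀ y ∈ high, pvBf x y = true) :
    PySem.List.insertBy pvBf x (low ++ high) = low ++ x :: high := by
  rw [insertBy_skip _ _ _ _ hlow, insertBy_front _ _ _ hhigh]

lemma pvG0_expand (q : List String) : pvG0 q =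
    (if q.contains "en" then ["en"] else []) ++
      ((if q.contains "en-US" then ["en-US"] else []) ++
        ((if q.contains "en-GB" then ["en-GB"] else []) ++
          (if q.contains "a.en" then ["a.en"] else []))) := by
  simp only [pvG0, pvEnglishLangs, List.filter_cons, List.filter_nil]
  split_ifs <;> simp_all

lemma contains_append_single {p : List String} {x l : String} (h : l ≠ x) :
    (p ++ [x]).contains l = p.contains l := by
  simp [List.contains_eq_mem, h]

lemma mem_ite_sing {c : Prop} [Decidable c] {y s : String} (h : y ∈ (if c then [s] else [])) :
    y = s := by
  split at h
  · simpa using h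
  · simp at h

lemma insert_step (p : List String) (x : String) (hx : x ∉ p) :
    PySem.List.insertBy pvBf x (pvG p) = pvG (p ++ [x]) := by
  by_cases hxE : x ∈ pvEnglishLangs
  · -- x is one of the four English-priority languages
    have hcx : pvEnglishLangs.contains x = true := by simpa [List.contains_eq_mem] using hxE
    have hg1 : pvG1 (p ++ [x]) = pvG1 p := by
      unfold pvG1
      rw [List.filter_append]
      have hp : (PySem.Str.startswith x "en" && !pvEnglishLangs.contains x) = false := by
        rw [hcx]; simp
      simp only [List.filter_cons, List.filter_nil, hp, Bool.false_eq_true, if_false,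
        List.append_nil]
    have hg2 : pvG2 (p ++ [x]) = pvG2 p := by
      unfold pvG2
      rw [List.filter_append]
      have hp : (!pvEnglishLangs.contains x && !PySem.Str.startswith x "en") = false := by
        rw [hcx]; simp
      simp only [List.filter_cons, List.filter_nil, hp, Bool.false_eq_true, if_false,
        List.append_nil]
    fin_cases hxE
    -- x = "en"
    · have hfront : ∀ y ∈ pvG p, pvBf "en" y = true := by
        intro y hy
        unfold pvG at hy
        simp only [List.mem_append] at hy
        rcases hy with (h | h) | h
        · obtain ⟨hyE, hyp⟩ := mem_pvG0 h
          have hne : y ≠ "en" := fun e => hx (e ▸ hyp)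
          fin_cases hyE
          · exact absurd rfl hne
          all_goals decide
        · rw [pvBf, key_mem_pvG1 h]; decide
        · rw [pvBf, key_mem_pvG2 h]; decide
      rw [insertBy_front _ _ _ hfront]
      have h00 : pvG0 (p ++ ["en"]) = "en" :: pvG0 p := by
        rw [pvG0_expand (p ++ ["en"]), pvG0_expand p]
        simp [hx]
      unfold pvG
      rw [h00, hg1, hg2]
      simp
    -- x = "en-US"
    · have hsplit : pvG p = (if p.contains "en" then ["en"] else []) ++
          ((if p.contains "en-GB" then ["en-GB"] else []) ++
            ((if p.contains "a.en" then ["a.en"] else []) ++ (pvG1 p ++ pvG2 p))) := by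
        unfold pvG
        rw [pvG0_expand p]
        simp [hx]
      rw [hsplit, insert_mid _ _ _ ?_ ?_]
      · unfold pvG
        rw [pvG0_expand (p ++ ["en-US"]), hg1, hg2]
        simp
      · intro y hy
        rw [mem_ite_sing hy, pvBf]; decide
      · intro y hy
        simp only [List.mem_append] at hy
        rcases hy with h | h | h | h
        · rw [mem_ite_sing h, pvBf]; decide
        · rw [mem_ite_sing h, pvBf]; decide
        · rw [pvBf, key_mem_pvG1 h]; decide
        · rw [pvBf, key_mem_pvG2 h]; decide
    -- x = "en-GB"
    · have hsplit : pvG p = ((if p.contains "en" then ["en"] else []) ++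
          (if p.contains "en-US" then ["en-US"] else [])) ++
            ((if p.contains "a.en" then ["a.en"] else []) ++ (pvG1 p ++ pvG2 p)) := by
        unfold pvG
        rw [pvG0_expand p]
        simp [hx]
      rw [hsplit, insert_mid _ _ _ ?_ ?_]
      · unfold pvG
        rw [pvG0_expand (p ++ ["en-GB"]), hg1, hg2]
        simp
      · intro y hy
        simp only [List.mem_append] at hy
        rcases hy with h | h
        · rw [mem_ite_sing h, pvBf]; decide
        · rw [mem_ite_sing h, pvBf]; decide
      · intro y hy
        simp only [List.mem_append] at hy
        rcases hy with h | h | h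
        · rw [mem_ite_sing h, pvBf]; decide
        · rw [pvBf, key_mem_pvG1 h]; decide
        · rw [pvBf, key_mem_pvG2 h]; decide
    -- x = "a.en"
    · have hsplit : pvG p = (((if p.contains "en" then ["en"] else []) ++
          (if p.contains "en-US" then ["en-US"] else [])) ++
            (if p.contains "en-GB" then ["en-GB"] else [])) ++ (pvG1 p ++ pvG2 p) := by
        unfold pvG
        rw [pvG0_expand p]
        simp [hx]
      rw [hsplit, insert_mid _ _ _ ?_ ?_]
      · unfold pvG
        rw [pvG0_expand (p ++ ["a.en"]), hg1, hg2]
        simp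
      · intro y hy
        simp only [List.mem_append] at hy
        rcases hy with (h | h) | h
        · rw [mem_ite_sing h, pvBf]; decide
        · rw [mem_ite_sing h, pvBf]; decide
        · rw [mem_ite_sing h, pvBf]; decide
      · intro y hy
        simp only [List.mem_append] at hy
        rcases hy with h | h
        · rw [pvBf, key_mem_pvG1 h]; decide
        · rw [pvBf, key_mem_pvG2 h]; decide
  · -- x is not an English-priority language
    have hxc : pvEnglishLangs.contains x = false := by
      simpa [List.contains_eq_mem] using hxE
    have hg0 : pvG0 (p ++ [x]) = pvG0 p := by
      unfold pvG0
      apply List.filter_congr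
      intro l hl
      exact contains_append_single (fun e => hxE (e ▸ hl))
    by_cases hs : PySem.Str.startswith x "en" = true
    · have hkx : pvKey x = (1, 0) := pvKey_of_g1 hs hxc
      have hg1 : pvG1 (p ++ [x]) = pvG1 p ++ [x] := by
        unfold pvG1
        rw [List.filter_append]
        have hp : (PySem.Str.startswith x "en" && !pvEnglishLangs.contains x) = true := by
          rw [hs, hxc]; rfl
        simp only [List.filter_cons, List.filter_nil, hp, if_true]
      have hg2 : pvG2 (p ++ [x]) = pvG2 p := by
        unfold pvG2
        rw [List.filter_append]
        have hp : (!pvEnglishLangs.contains x && !PySem.Str.startswith x "en") = false := by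
          rw [hs]; simp
        simp only [List.filter_cons, List.filter_nil, hp, Bool.false_eq_true, if_false,
        List.append_nil]
      unfold pvG
      rw [insert_mid x (pvG0 p ++ pvG1 p) (pvG2 p) ?_ ?_]
      · rw [hg0, hg1, hg2]
        simp
      · intro y hy
        simp only [List.mem_append] at hy
        apply pvBf_false
        rcases hy with h | h
        · have h0 := keyE_fst (mem_pvG0 h).1
          left; rw [h0, hkx]; norm_num
        · right; rw [key_mem_pvG1 h, hkx]; norm_num
      · intro y hy
        apply pvBf_true
        left; rw [key_mem_pvG2 hy, hkx]; norm_num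
    · have hs' : PySem.Str.startswith x "en" = false := by simpa using hs
      have hkx : pvKey x = (2, 0) := pvKey_of_g2 hs' hxc
      have hg1 : pvG1 (p ++ [x]) = pvG1 p := by
        unfold pvG1
        rw [List.filter_append]
        have hp : (PySem.Str.startswith x "en" && !pvEnglishLangs.contains x) = false := by
          rw [hs']; rfl
        simp only [List.filter_cons, List.filter_nil, hp, Bool.false_eq_true, if_false,
        List.append_nil]
      have hg2 : pvG2 (p ++ [x]) = pvG2 p ++ [x] := by
        unfold pvG2
        rw [List.filter_append]
        have hp : (!pvEnglishLangs.contains x && !PySem.Str.startswith x "en") = true := by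
          rw [hs', hxc]; rfl
        simp only [List.filter_cons, List.filter_nil, hp, if_true]
      rw [PySem.List.insertBy_of_forall_not_before _ _ _ ?_]
      · unfold pvG
        rw [hg0, hg1, hg2]
        simp
      · intro y hy
        unfold pvG at hy
        simp only [List.mem_append] at hy
        apply pvBf_false
        rcases hy with (h | h) | h
        · have h0 := keyE_fst (mem_pvG0 h).1
          left; rw [h0, hkx]; norm_num
        · left; rw [key_mem_pvG1 h, hkx]; norm_num
        · right; rw [key_mem_pvG2 h, hkx]; norm_num

lemma portB_fold (ks : List String) :
    ∀ p : List String, (p ++ ks).Nodup →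
    ks.foldl (fun acc x => PySem.List.insertBy pvBf x acc) (pvG p) = pvG (p ++ ks) := by
  induction ks with
  | nil => intro p _; simp
  | cons k t ih =>
    intro p hnd
    have hk : k ∉ p := by
      intro h
      have := List.disjoint_of_nodup_append hnd h
      simp at this
    simp only [List.foldl_cons]
    rw [insert_step p k hk, ih (p ++ [k]) (by simpa using hnd)]
    simp

-- ===== VERDICT (by name: the statement is the Claim_ definition above) =====
theorem caption_language_priority_py_spec : Claim_equal_caption_language_priority_py := by
  intro cm _
  unfold Spec_caption_language_priority_py
  have hnd : (PySem.List.dedup (cm.map Prod.fst)).Nodup := PySem.List.nodup_dedup _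
  have hA : caption_language_priority_py cm = pvG (PySem.List.dedup (cm.map Prod.fst)) :=
    portA_eq_pvG _ hnd
  have h1 : caption_language_priority_py_alt cm =
      (PySem.List.dedup (cm.map Prod.fst)).foldl
        (fun acc x => PySem.List.insertBy pvBf x acc) (pvG []) := by
    have h0 : pvG ([] : List String) = [] := by decide
    rw [h0]; rfl
  have hnd' : (([] : List String) ++ PySem.List.dedup (cm.map Prod.fst)).Nodup := by
    simp only [List.nil_append]; exact hnd
  have hB : caption_language_priority_py_alt cm = pvG (PySem.List.dedup (cm.map Prod.fst)) := by
    rw [h1, portB_fold _ [] hnd']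
    simp
  rw [hA, hB]
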